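-- pv_equiv track=rewrite | github.com/OkhotnikovFN/Yandex-Algorithms | trainings_1.0/hw_5/task_e/e.py | beautiful_trees
-- ===== SOURCE A (Python) =====
-- from collections import Counter
-- from typing import Tuple, List
--
-- def beautiful_trees(k: int, colors: List[int]) -> Tuple[int, int]:
--     """
--     Функция которая вычисляет координаты левого и правого концов отрезка минимальной длины, удовлетворяющего условию.
--         Параметры:
--             :param k: количество сортов деревьев
--             :type k: int
--             :param colors: исходный список деревьев, в котором необходимо найти подотрезок, удовлетворяющего условию
--             :type colors: List[int]
--         Возвращаемое значение:
--             :return: координаты левого и правого концов отрезка минимальной длины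
--             :rtype: Tuple[int, int]
--     """
--     left = 0
--     segment_colors = Counter()
--     best_segment = [0, len(colors)]
--
--     for right, color in enumerate(colors):
--         segment_colors[color] += 1
--         if len(segment_colors) == k:
--             while segment_colors[colors[left]] > 1:
--                 segment_colors[colors[left]] -= 1
--                 left += 1
--
--             if right - left < best_segment[1] - best_segment[0]:
--                 best_segment = (left, right)
--
--     return best_segment[0] + 1, best_segment[1] + 1
-- ===== SOURCE B (Python) =====
-- from typing import Tuple, List
--
--
-- def beautiful_trees(k: int, colors: List[int]) -> Tuple[int, int]:
--     """Shortest segment containing all k colors, via last-occurrence positions.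
--
--     Instead of a shrinking left pointer over window counts, keep for each color
--     its latest index; once k distinct colors were seen, the best left end for
--     the current right end is the minimum of those latest indices.
--     """
--     last_pos = {}
--     best = (0, len(colors))
--
--     for right, color in enumerate(colors):
--         last_pos[color] = right
--         if len(last_pos) == k:
--             left = min(last_pos.values())
--             if right - left < best[1] - best[0]:
--                 best = (left, right)
--
--     return best[0] + 1, best[1] + 1
-- ===== Notes on version B (the rewrite author's own statement) =====
-- stated objective: alternative
-- what changed: Replaced A's shrinking left-pointer window with per-color counts by a single dict of last-occurrence indices: once k distinct colors are seen, the left end is min(last_pos.values()), so the inner while-loop disappears.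
import Mathlib
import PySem

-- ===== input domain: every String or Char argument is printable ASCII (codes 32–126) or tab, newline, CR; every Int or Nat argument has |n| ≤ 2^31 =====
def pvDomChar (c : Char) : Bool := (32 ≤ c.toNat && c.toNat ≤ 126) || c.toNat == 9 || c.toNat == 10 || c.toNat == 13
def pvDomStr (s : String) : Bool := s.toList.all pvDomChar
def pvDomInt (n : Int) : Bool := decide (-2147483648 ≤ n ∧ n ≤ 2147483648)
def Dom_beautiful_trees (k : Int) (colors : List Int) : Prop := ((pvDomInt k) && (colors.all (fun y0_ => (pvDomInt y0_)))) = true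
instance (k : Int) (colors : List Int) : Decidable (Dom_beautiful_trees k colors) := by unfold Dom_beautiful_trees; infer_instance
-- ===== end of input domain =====

-- B replaces A's shrinking left-pointer loop over window counts by a dict of last
-- occurrences whose minimum value is the left end (objective: alternative algorithm).

-- ===== PORT A =====
-- the inner `while segment_colors[colors[left]] > 1` loop of A
-- (left starts at 0 and only increases, so it is kept as a Nat; colors[left] is
-- an in-range nonnegative index whenever Python reaches this loop, so getElem?
-- is exact there; on the unreachable out-of-range case Python would raise).
def btShrink (colors : List Int) (cnt : PySem.Dict Int Int) (left : Nat) :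
    PySem.Dict Int Int × Nat :=
  match h : colors[left]? with
  | some c =>
    if cnt.getD c 0 > 1 then
      btShrink colors (cnt.modify c 0 (· - 1)) (left + 1)
    else (cnt, left)
  | none => (cnt, left)
termination_by colors.length - left
decreasing_by
  obtain ⟨hlt, -⟩ := List.getElem?_eq_some_iff.mp h
  omega

-- `for right, color in enumerate(colors)` with running index `right`
def btLoopA (k : Int) (colors : List Int) :
    List Int → Int → Nat × PySem.Dict Int Int × (Int × Int) → Nat × PySem.Dict Int Int × (Int × Int)
  | [], _, st => st
  | color :: rest, right, (left, cnt, best) =>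
    let cnt1 := cnt.modify color 0 (· + 1)           -- segment_colors[color] += 1
    if (cnt1.size : Int) = k then
      let r := btShrink colors cnt1 left
      let best1 := if right - (r.2 : Int) < best.2 - best.1 then ((r.2 : Int), right) else best
      btLoopA k colors rest (right + 1) (r.2, r.1, best1)
    else
      btLoopA k colors rest (right + 1) (left, cnt1, best)

def beautiful_trees (k : Int) (colors : List Int) : Int × Int :=
  let st := btLoopA k colors colors 0 (0, PySem.Dict.empty, (0, (colors.length : Int)))
  (st.2.2.1 + 1, st.2.2.2 + 1)

-- ===== PORT B =====
-- `for right, color in enumerate(colors)` of Source B, state = (last_pos, best)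
def btLoopB (k : Int) :
    List Int → Int → PySem.Dict Int Int × (Int × Int) → PySem.Dict Int Int × (Int × Int)
  | [], _, st => st
  | color :: rest, right, (lp, best) =>
    let lp1 := lp.insert color right                 -- last_pos[color] = right
    if (lp1.size : Int) = k then
      match PySem.List.min? lp1.values (fun v => v) with   -- min(last_pos.values())
      | some left =>
        let best1 := if right - left < best.2 - best.1 then (left, right) else best
        btLoopB k rest (right + 1) (lp1, best1)
      | none => btLoopB k rest (right + 1) (lp1, best)     -- unreachable: dict nonempty here
    else
      btLoopB k rest (right + 1) (lp1, best)

def beautiful_trees_alt (k : Int) (colors : List Int) : Int × Int :=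
  let st := btLoopB k colors 0 (PySem.Dict.empty, (0, (colors.length : Int)))
  (st.2.1 + 1, st.2.2 + 1)

-- ===== PRECONDITION & SPEC =====
def Spec_beautiful_trees (k : Int) (colors : List Int) (out : Int × Int) : Prop := out = beautiful_trees_alt k colors
instance (k : Int) (colors : List Int) (out : Int × Int) : Decidable (Spec_beautiful_trees k colors out) := by unfold Spec_beautiful_trees; infer_instance

-- ===== CLAIM (what is proved, stated in full; the proofs are below) =====
def Claim_equal_beautiful_trees : Prop := ∀ (k : Int) (colors : List Int), Dom_beautiful_trees k colors → Spec_beautiful_trees k colors (beautiful_trees k colors)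

-- ===== LEMMAS AND PROOFS =====

-- index of the LAST occurrence of c in p (meaningful when c ∈ p)
def lastIdx : List Int → Int → Nat
  | [], _ => 0
  | _ :: t, c => if c ∈ t then lastIdx t c + 1 else 0

theorem lastIdx_lt_length {p : List Int} {c : Int} (h : c ∈ p) : lastIdx p c < p.length := by
  induction p with
  | nil => cases h
  | cons x t ih =>
    by_cases ht : c ∈ t
    · simp [lastIdx, ht]; exact ih ht
    · simp [lastIdx, ht]

theorem lastIdx_getElem? {p : List Int} {c : Int} (h : c ∈ p) : p[lastIdx p c]? = some c := by
  induction p with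
  | nil => cases h
  | cons x t ih =>
    by_cases ht : c ∈ t
    · simp [lastIdx, ht, ih ht]
    · have hx : c = x := by rcases List.mem_cons.mp h with h' | h'; exact h'; exact absurd h' ht
      subst hx
      simp [lastIdx, ht]

theorem lastIdx_append_self (p : List Int) (x : Int) : lastIdx (p ++ [x]) x = p.length := by
  induction p with
  | nil => simp [lastIdx]
  | cons a t ih =>
    have hx : x ∈ t ++ [x] := by simp
    simp [lastIdx, hx, ih]

theorem lastIdx_append_ne {c x : Int} (p : List Int) (hne : c ≠ x) :
    lastIdx (p ++ [x]) c = lastIdx p c := by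
  induction p with
  | nil => simp [lastIdx]
  | cons a t ih =>
    by_cases ht : c ∈ t
    · have : c ∈ t ++ [x] := by simp [ht]
      simp [lastIdx, ht, this, ih]
    · have : c ∉ t ++ [x] := by simp [ht, hne]
      simp [lastIdx, ht, this]

theorem lastIdx_count_one {p : List Int} {c : Int} (h : c ∈ p) :
    (p.drop (lastIdx p c)).count c = 1 := by
  induction p with
  | nil => cases h
  | cons x t ih =>
    by_cases ht : c ∈ t
    · simpa [lastIdx, ht] using ih ht
    · have hx : c = x := by rcases List.mem_cons.mp h with h' | h'; exact h'; exact absurd h' ht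
      simp [lastIdx, hx, List.count_eq_zero_of_not_mem, hx ▸ ht]

theorem mem_drop_of_le_lastIdx {p : List Int} {c : Int} {n : Nat} (h : c ∈ p)
    (hn : n ≤ lastIdx p c) : c ∈ p.drop n := by
  have h1 : (p.drop n)[lastIdx p c - n]? = some c := by
    rw [List.getElem?_drop]
    have : n + (lastIdx p c - n) = lastIdx p c := by omega
    rw [this]; exact lastIdx_getElem? h
  exact List.mem_of_getElem? h1

theorem mem_of_append_singleton {p : List Int} {c x : Int}
    (h : c ∈ p ++ [x]) (hne : c ≠ x) : c ∈ p := by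
  rcases List.mem_append.mp h with h' | h'
  · exact h'
  · exact absurd (List.mem_singleton.mp h') hne

-- the joint invariant between A's state (left, cnt) and B's state (lp) after prefix p
def BTInv (p : List Int) (left : Nat) (cnt lp : PySem.Dict Int Int) : Prop :=
  cnt.keys = PySem.Set.ofList p ∧
  lp.keys = PySem.Set.ofList p ∧
  (∀ c, cnt.getD c 0 = ((p.drop left).count c : Int)) ∧
  (∀ c ∈ p, lp.getD c 0 = (lastIdx p c : Int)) ∧
  left ≤ p.length ∧
  (∀ c ∈ p, left ≤ lastIdx p c)

-- keys of a `modify` with an already-present key are unchanged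
theorem keys_modify_of_contains {d : PySem.Dict Int Int} {c : Int} (d0 : Int) (f : Int → Int)
    (h : d.contains c = true) : (d.modify c d0 f).keys = d.keys := by
  rw [PySem.Dict.keys_modify, PySem.Dict.keys_insert_of_contains _ _ h]

-- A's while-loop stops exactly at m, the minimum last-occurrence index
theorem btShrink_aux (p s : List Int) (c0 : Int) (m : Nat)
    (hm : m < p.length) (hpm : p[m]? = some c0) (h1 : (p.drop m).count c0 = 1)
    (hmin : ∀ c ∈ p, m ≤ lastIdx p c) :
    ∀ (d left : Nat) (cnt : PySem.Dict Int Int), left + d = m →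
      (∀ c, cnt.getD c 0 = ((p.drop left).count c : Int)) →
      ∃ cnt', btShrink (p ++ s) cnt left = (cnt', m) ∧ cnt'.keys = cnt.keys ∧
        (∀ c, cnt'.getD c 0 = ((p.drop m).count c : Int)) := by
  intro d
  induction d with
  | zero =>
    intro left cnt hlm Hc
    have hlm' : left = m := by omega
    subst hlm'
    refine ⟨cnt, ?_, rfl, Hc⟩
    rw [btShrink]
    have hidx : (p ++ s)[left]? = some c0 := by
      rw [List.getElem?_append, if_pos hm]; exact hpm
    split
    · rename_i c hc
      rw [hidx] at hc; cases hc
      have : cnt.getD c0 0 = 1 := by rw [Hc c0, h1]; rfl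
      rw [this]
      norm_num
    · rename_i hc
      simp [hidx] at hc
  | succ d ih =>
    intro left cnt hlm Hc
    have hlt : left < m := by omega
    have hlp : left < p.length := by omega
    obtain ⟨c, hc⟩ : ∃ c, p[left]? = some c := ⟨p[left], (List.getElem?_eq_some_iff).mpr ⟨hlp, rfl⟩⟩
    have hcm : c ∈ p := List.mem_of_getElem? hc
    have hcg : p[left] = c := by
      have := (List.getElem?_eq_some_iff).mp hc; exact this.2
    have hdrop : p.drop left = c :: p.drop (left + 1) := by
      rw [List.drop_eq_getElem_cons hlp, hcg]
    have hmemd : c ∈ p.drop (left + 1) := by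
      exact mem_drop_of_le_lastIdx hcm (by have := hmin c hcm; omega)
    have hcount2 : 2 ≤ (p.drop left).count c := by
      rw [hdrop, List.count_cons_self]
      have := List.count_pos_iff.mpr hmemd
      omega
    rw [btShrink]
    have hidx : (p ++ s)[left]? = some c := by
      rw [List.getElem?_append, if_pos hlp]; exact hc
    split
    · rename_i c' hc'
      rw [hidx] at hc'; cases hc'
      have hguard : cnt.getD c 0 > 1 := by
        rw [Hc c]; exact_mod_cast hcount2
      rw [if_pos hguard]
      have hcont : cnt.contains c = true := by
        by_contra hno
        have : cnt.getD c 0 = 0 := PySem.Dict.getD_of_not_contains cnt 0 (by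
          cases hcc : cnt.contains c
          · rfl
          · exact absurd hcc hno)
        omega
      have Hc' : ∀ c2, (cnt.modify c 0 (· - 1)).getD c2 0 = (((p.drop (left + 1)).count c2 : Nat) : Int) := by
        intro c2
        rw [PySem.Dict.getD_modify]
        by_cases he : c2 = c
        · subst he
          rw [if_pos rfl, Hc c2, hdrop, List.count_cons_self]
          push_cast; ring
        · rw [if_neg he, Hc c2, hdrop, List.count_cons_of_ne (Ne.symm he)]
      obtain ⟨cnt', heq, hkeys, hcnt⟩ := ih (left + 1) (cnt.modify c 0 (· - 1)) (by omega) Hc'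
      exact ⟨cnt', heq, by rw [hkeys, keys_modify_of_contains _ _ hcont], hcnt⟩
    · rename_i hc'
      simp [hidx] at hc'

-- the main simulation: after any common prefix p the two loops keep equal `best`
theorem btLoop_sim (k : Int) : ∀ (s p : List Int) (left : Nat)
    (cnt lp : PySem.Dict Int Int) (best : Int × Int),
    BTInv p left cnt lp →
    (btLoopA k (p ++ s) s (p.length : Int) (left, cnt, best)).2.2 =
    (btLoopB k s (p.length : Int) (lp, best)).2 := by
  intro s
  induction s with
  | nil => intro p left cnt lp best _; rfl
  | cons color rest ih =>
    intro p left cnt lp best hinv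
    obtain ⟨hkc, hkl, Hcnt, Hlp, hlen, hlb⟩ := hinv
    set p' := p ++ [color] with hp'
    have hnodup' : (PySem.Set.ofList p').Nodup := PySem.Set.nodup_ofList p'
    -- updated dicts
    set cnt1 := cnt.modify color 0 (· + 1) with hcnt1
    set lp1 := lp.insert color ((p.length : Int)) with hlp1
    -- keys of both updated dicts are Set.ofList p'
    have hkc1 : cnt1.keys = PySem.Set.ofList p' := by
      rw [hcnt1, PySem.Dict.keys_modify, hp', PySem.Set.ofList_append_singleton,
        PySem.Set.add_eq_ite]
      by_cases hmem : color ∈ p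
      · have : cnt.contains color = true := by
          rw [PySem.Dict.contains_iff_mem_keys, hkc]
          exact (PySem.Set.mem_ofList _ _).mpr hmem
        rw [PySem.Dict.keys_insert_of_contains _ _ this, hkc,
          if_pos ((PySem.Set.mem_ofList _ _).mpr hmem)]
      · have : cnt.contains color = false := by
          cases hcc : cnt.contains color
          · rfl
          · exact absurd ((PySem.Dict.contains_iff_mem_keys _ _).mp hcc)
              (by rw [hkc]; exact fun hx => hmem ((PySem.Set.mem_ofList _ _).mp hx))
        rw [PySem.Dict.keys_insert_of_not_contains _ _ this, hkc,
          if_neg (fun hx => hmem ((PySem.Set.mem_ofList _ _).mp hx))]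
    have hkl1 : lp1.keys = PySem.Set.ofList p' := by
      rw [hlp1, hp', PySem.Set.ofList_append_singleton, PySem.Set.add_eq_ite]
      by_cases hmem : color ∈ p
      · have : lp.contains color = true := by
          rw [PySem.Dict.contains_iff_mem_keys, hkl]
          exact (PySem.Set.mem_ofList _ _).mpr hmem
        rw [PySem.Dict.keys_insert_of_contains _ _ this, hkl,
          if_pos ((PySem.Set.mem_ofList _ _).mpr hmem)]
      · have : lp.contains color = false := by
          cases hcc : lp.contains color
          · rfl
          · exact absurd ((PySem.Dict.contains_iff_mem_keys _ _).mp hcc)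
              (by rw [hkl]; exact fun hx => hmem ((PySem.Set.mem_ofList _ _).mp hx))
        rw [PySem.Dict.keys_insert_of_not_contains _ _ this, hkl,
          if_neg (fun hx => hmem ((PySem.Set.mem_ofList _ _).mp hx))]
    have hsz : cnt1.size = lp1.size := by
      have h1 : cnt1.size = cnt1.keys.length := by
        simp [PySem.Dict.size, PySem.Dict.keys]
      have h2 : lp1.size = lp1.keys.length := by
        simp [PySem.Dict.size, PySem.Dict.keys]
      rw [h1, h2, hkc1, hkl1]
    -- updated counts and last positions
    have Hcnt1 : ∀ c, cnt1.getD c 0 = ((p'.drop left).count c : Int) := by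
      intro c
      have hd : p'.drop left = p.drop left ++ [color] := by
        rw [hp', List.drop_append_of_le_length hlen]
      rw [hcnt1, PySem.Dict.getD_modify, hd, List.count_append]
      by_cases he : c = color
      · subst he; rw [if_pos rfl, Hcnt c]; simp
      · rw [if_neg he, Hcnt c]
        simp [Ne.symm he]
    have Hlp1 : ∀ c ∈ p', lp1.getD c 0 = (lastIdx p' c : Int) := by
      intro c hcmem
      rw [hlp1, PySem.Dict.getD_insert]
      by_cases he : c = color
      · subst he; rw [if_pos rfl, hp', lastIdx_append_self]
      · rw [if_neg he, hp', lastIdx_append_ne p he,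
          Hlp c (mem_of_append_singleton (hp' ▸ hcmem) he)]
    have hlen' : left ≤ p'.length := by rw [hp']; simp; omega
    have hlb' : ∀ c ∈ p', left ≤ lastIdx p' c := by
      intro c hcmem
      by_cases he : c = color
      · subst he; rw [hp', lastIdx_append_self]; exact hlen
      · rw [hp', lastIdx_append_ne p he]
        exact hlb c (mem_of_append_singleton (hp' ▸ hcmem) he)
    -- one unfolding of each loop
    have hassoc : p ++ color :: rest = p' ++ rest := by simp [hp']
    have hlen'' : ((p'.length : Nat) : Int) = (p.length : Int) + 1 := by
      rw [hp']; simp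
    rw [show (btLoopA k (p ++ color :: rest) (color :: rest) (p.length : Int) (left, cnt, best)) =
        (if (cnt1.size : Int) = k then
          let r := btShrink (p ++ color :: rest) cnt1 left
          let best1 := if (p.length : Int) - (r.2 : Int) < best.2 - best.1
            then ((r.2 : Int), (p.length : Int)) else best
          btLoopA k (p ++ color :: rest) rest ((p.length : Int) + 1) (r.2, r.1, best1)
        else btLoopA k (p ++ color :: rest) rest ((p.length : Int) + 1) (left, cnt1, best)) from rfl]
    rw [show (btLoopB k (color :: rest) (p.length : Int) (lp, best)) =
        (if (lp1.size : Int) = k then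
          match PySem.List.min? lp1.values (fun v => v) with
          | some l =>
            btLoopB k rest ((p.length : Int) + 1)
              (lp1, if (p.length : Int) - l < best.2 - best.1 then (l, (p.length : Int)) else best)
          | none => btLoopB k rest ((p.length : Int) + 1) (lp1, best)
        else btLoopB k rest ((p.length : Int) + 1) (lp1, best)) from rfl]
    rw [hsz]
    by_cases hk : (lp1.size : Int) = k
    · rw [if_pos hk, if_pos hk]
      -- B's min over last positions
      have hvne : lp1.values ≠ [] := by
        intro hnil
        have hkeynil : lp1.keys = [] := by
          have h1 : lp1.items.map Prod.snd = [] := hnil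
          have : lp1.items = [] := by
            cases hit : lp1.items
            · rfl
            · rw [hit] at h1; cases h1
          simp [PySem.Dict.keys, this]
        have : color ∈ lp1.keys := by
          rw [hkl1]
          exact (PySem.Set.mem_ofList _ _).mpr (by simp [hp'])
        rw [hkeynil] at this; cases this
      obtain ⟨v, hv⟩ : ∃ v, PySem.List.min? lp1.values (fun v => v) = some v := by
        cases hmv : PySem.List.min? lp1.values (fun v => v)
        · exact absurd ((PySem.List.min?_eq_none_iff _ _).mp hmv) hvne
        · exact ⟨_, rfl⟩
      rw [hv]
      -- v is attained: v = lastIdx p' c0 for some c0 ∈ p'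
      have hvalues : lp1.values = lp1.keys.map (fun c => lp1.getD c 0) :=
        PySem.Dict.values_eq_map_keys lp1 (hkl1 ▸ hnodup') 0
      have hvmem := PySem.List.min?_mem hv
      rw [hvalues] at hvmem
      obtain ⟨c0, hc0k, hc0v⟩ := List.mem_map.mp hvmem
      have hc0p : c0 ∈ p' := (PySem.Set.mem_ofList _ _).mp (hkl1 ▸ hc0k)
      have hveq : v = (lastIdx p' c0 : Int) := by rw [← hc0v, Hlp1 c0 hc0p]
      set m := lastIdx p' c0 with hmdef
      -- v is a lower bound on all last positions
      have hmin : ∀ c ∈ p', m ≤ lastIdx p' c := by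
        intro c hcp
        have hcin : lp1.getD c 0 ∈ lp1.values := by
          rw [hvalues]
          exact List.mem_map.mpr ⟨c, hkl1 ▸ (PySem.Set.mem_ofList _ _).mpr hcp, rfl⟩
        have := PySem.List.min?_isMin hv _ hcin
        rw [hveq, Hlp1 c hcp] at this
        exact_mod_cast this
      have hmlt : m < p'.length := lastIdx_lt_length hc0p
      have hlem : left ≤ m := hlb' c0 hc0p
      have hpm : p'[m]? = some c0 := lastIdx_getElem? hc0p
      have h1 : (p'.drop m).count c0 = 1 := lastIdx_count_one hc0p
      obtain ⟨cnt2, hsh, hkeys2, Hcnt2⟩ :=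
        btShrink_aux p' rest c0 m hmlt hpm h1 hmin (m - left) left cnt1 (by omega) Hcnt1
      rw [hassoc, hsh]
      simp only [hveq]
      have := ih p' m cnt2 lp1
        (if (p.length : Int) - (m : Int) < best.2 - best.1 then ((m : Int), (p.length : Int)) else best)
        ⟨hkeys2.trans hkc1, hkl1, Hcnt2, Hlp1, by omega, hmin⟩
      rw [hlen''] at this
      exact this
    · rw [if_neg hk, if_neg hk, hassoc]
      have := ih p' left cnt1 lp1 best ⟨hkc1, hkl1, Hcnt1, Hlp1, hlen', hlb'⟩
      rw [hlen''] at this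
      exact this

-- ===== VERDICT (by name: the statement is the Claim_ definition above) =====
theorem beautiful_trees_spec : Claim_equal_beautiful_trees := by
  intro k colors _
  unfold Spec_beautiful_trees
  have hinv : BTInv [] 0 PySem.Dict.empty PySem.Dict.empty := by
    refine ⟨rfl, rfl, ?_, ?_, ?_, ?_⟩
    · intro c; simp [PySem.Dict.getD_empty]
    · intro c hc; cases hc
    · simp
    · intro c hc; cases hc
  have h := btLoop_sim k colors [] 0 PySem.Dict.empty PySem.Dict.empty
    (0, (colors.length : Int)) hinv
  simp only [List.nil_append, List.length_nil, Nat.cast_zero] at h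
  show ((btLoopA k colors colors 0 (0, PySem.Dict.empty, (0, (colors.length : Int)))).2.2.1 + 1,
        (btLoopA k colors colors 0 (0, PySem.Dict.empty, (0, (colors.length : Int)))).2.2.2 + 1) =
       ((btLoopB k colors 0 (PySem.Dict.empty, (0, (colors.length : Int)))).2.1 + 1,
        (btLoopB k colors 0 (PySem.Dict.empty, (0, (colors.length : Int)))).2.2 + 1)
  rw [h]
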